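-- pv_equiv track=rewrite | github.com/kvm11l/Python-zadania-NJP | Zestaw2_zadanie3.py | oblicz_statystyki
-- ===== SOURCE A (Python) =====
-- def oblicz_statystyki(kolekcja):
--     statystyki = {}
--     for ksiazka in kolekcja:
--         gatunek = ksiazka['gatunek']
--         autor = ksiazka['autor']
--         if gatunek not in statystyki:
--             statystyki[gatunek] = {}
--         if autor not in statystyki[gatunek]:
--             statystyki[gatunek][autor] = 1
--         else:
--             statystyki[gatunek][autor] += 1
--     return statystyki
-- ===== SOURCE B (Python) =====
-- def oblicz_statystyki(kolekcja):
--     licznik = {}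
--     for ksiazka in kolekcja:
--         para = (ksiazka['gatunek'], ksiazka['autor'])
--         licznik[para] = licznik.get(para, 0) + 1
--     wynik = {}
--     for (gatunek, autor), ile in licznik.items():
--         wynik.setdefault(gatunek, {})[autor] = ile
--     return wynik
-- ===== Notes on version B (the rewrite author's own statement) =====
-- stated objective: alternative
-- what changed: B replaces A's one-pass nested-dict build with two shaped passes: a flat dict counting (gatunek, autor) pairs, then a reshape of that flat table into the nested dict via setdefault.
import Mathlib
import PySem

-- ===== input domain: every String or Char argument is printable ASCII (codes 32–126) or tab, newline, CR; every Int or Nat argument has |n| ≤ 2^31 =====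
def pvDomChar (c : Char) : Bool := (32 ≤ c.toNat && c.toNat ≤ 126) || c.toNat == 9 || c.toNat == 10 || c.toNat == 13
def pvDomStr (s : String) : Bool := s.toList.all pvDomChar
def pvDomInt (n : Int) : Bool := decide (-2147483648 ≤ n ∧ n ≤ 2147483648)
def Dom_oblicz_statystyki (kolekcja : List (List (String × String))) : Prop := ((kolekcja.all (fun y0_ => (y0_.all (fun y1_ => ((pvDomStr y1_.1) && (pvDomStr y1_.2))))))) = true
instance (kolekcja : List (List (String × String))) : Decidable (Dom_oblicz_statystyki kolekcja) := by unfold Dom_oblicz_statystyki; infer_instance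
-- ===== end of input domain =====

-- B replaces A's one-pass nested-dict build with two shaped passes: flat (genre, author) pair counts, then a reshape into the nested dict.

-- ksiazka['gatunek'] as first-match association-list lookup; exact on Pre_ (which requires the key to be present, so the default is never read)
def pvKey (d : List (String × String)) (k : String) : String :=
  (((d.find? (fun p => p.1 == k)).map Prod.snd).getD "")

-- ===== PORT A =====
-- A's loop body: conditional genre insert, then conditional author count init/increment
def pvStepA (st : PySem.Dict String (PySem.Dict String Int)) (g a : String) :
    PySem.Dict String (PySem.Dict String Int) :=
  let st1 := if st.contains g then st else st.insert g PySem.Dict.empty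
  let inner := st1.getD g PySem.Dict.empty
  if inner.contains a then st1.insert g (inner.insert a (inner.getD a 0 + 1))
  else st1.insert g (inner.insert a 1)

def oblicz_statystyki (kolekcja : List (List (String × String))) : List (String × List (String × Int)) :=
  ((kolekcja.foldl (fun st ksiazka => pvStepA st (pvKey ksiazka "gatunek") (pvKey ksiazka "autor"))
      (PySem.Dict.empty : PySem.Dict String (PySem.Dict String Int))).items).map
    (fun p => (p.1, p.2.items))

-- ===== PORT B =====
-- licznik[para] = licznik.get(para, 0) + 1
def pvBump (d : PySem.Dict (String × String) Int) (p : String × String) : PySem.Dict (String × String) Int :=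
  d.insert p (d.getD p 0 + 1)

-- wynik.setdefault(gatunek, {})[autor] = ile
def pvSetNest (w : PySem.Dict String (PySem.Dict String Int)) (g a : String) (n : Int) :
    PySem.Dict String (PySem.Dict String Int) :=
  w.insert g ((w.getD g PySem.Dict.empty).insert a n)

-- second pass of B: fold the flat counter's items into the nested dict
def pvReshape (l : List ((String × String) × Int)) (w : PySem.Dict String (PySem.Dict String Int)) :
    PySem.Dict String (PySem.Dict String Int) :=
  l.foldl (fun w q => pvSetNest w q.1.1 q.1.2 q.2) w

def oblicz_statystyki_alt (kolekcja : List (List (String × String))) : List (String × List (String × Int)) :=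
  let licznik := kolekcja.foldl
      (fun d ksiazka => pvBump d (pvKey ksiazka "gatunek", pvKey ksiazka "autor"))
      (PySem.Dict.empty : PySem.Dict (String × String) Int)
  let wynik := pvReshape licznik.items PySem.Dict.empty
  wynik.items.map (fun p => (p.1, p.2.items))

-- ===== PRECONDITION & SPEC =====
-- Pre_ excludes exactly the inputs on which A raises KeyError: some book lacks the key 'gatunek' or 'autor'.
def Pre_oblicz_statystyki (kolekcja : List (List (String × String))) : Prop :=
  (kolekcja.all (fun ks => (ks.any (fun p => p.1 == "gatunek")) && (ks.any (fun p => p.1 == "autor")))) = true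
instance (kolekcja : List (List (String × String))) : Decidable (Pre_oblicz_statystyki kolekcja) := by unfold Pre_oblicz_statystyki; infer_instance

def pvWitness_oblicz_statystyki : (List (List (String × String))) :=
  [[("gatunek", "fantasy"), ("autor", "X")], [("gatunek", "fantasy"), ("autor", "X")]]

def Spec_oblicz_statystyki (kolekcja : List (List (String × String))) (out : List (String × List (String × Int))) : Prop := out = oblicz_statystyki_alt kolekcja
instance (kolekcja : List (List (String × String))) (out : List (String × List (String × Int))) : Decidable (Spec_oblicz_statystyki kolekcja out) := by unfold Spec_oblicz_statystyki; infer_instance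

-- ===== CLAIM (what is proved, stated in full; the proofs are below) =====
def Claim_equal_oblicz_statystyki : Prop := ∀ (kolekcja : List (List (String × String))), Dom_oblicz_statystyki kolekcja → Pre_oblicz_statystyki kolekcja → Spec_oblicz_statystyki kolekcja (oblicz_statystyki kolekcja)

-- ===== LEMMAS AND PROOFS =====

theorem pv_insert_comm {κ ν : Type} [BEq κ] [LawfulBEq κ] (d : PySem.Dict κ ν) (k k' : κ) (v v' : ν)
    (h : d.contains k = true) (hne : k' ≠ k) :
    (d.insert k v).insert k' v' = (d.insert k' v').insert k v := by
  by_cases h' : d.contains k' = true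
  · apply PySem.Dict.ext
    rw [PySem.Dict.items_insert_of_contains _ _ (by simp [PySem.Dict.contains_insert, h']),
        PySem.Dict.items_insert_of_contains _ _ h,
        PySem.Dict.items_insert_of_contains _ _ (by simp [PySem.Dict.contains_insert, h]),
        PySem.Dict.items_insert_of_contains _ _ h']
    simp only [List.map_map]
    apply List.map_congr_left
    intro p _
    simp only [Function.comp]
    by_cases hk : p.1 = k
    · simp [hk, Ne.symm hne]
    · by_cases hk' : p.1 = k' <;> simp [hk, hk', hne]
  · have h'f : d.contains k' = false := by simpa using h'
    apply PySem.Dict.ext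
    rw [PySem.Dict.items_insert_of_not_contains _ _
          (by simp [PySem.Dict.contains_insert, h'f, hne]),
        PySem.Dict.items_insert_of_contains _ _ h,
        PySem.Dict.items_insert_of_contains _ _ (by simp [PySem.Dict.contains_insert, h]),
        PySem.Dict.items_insert_of_not_contains _ _ h'f]
    simp only [List.map_append, List.map_cons, List.map_nil]
    congr 1
    simp [hne]



theorem pv_reshape_setNest_comm (g a : String) (n : Int) :
    ∀ (l : List ((String × String) × Int)) (w : PySem.Dict String (PySem.Dict String Int)),
    (∀ p ∈ l, p.1 ≠ (g, a)) → w.contains g = true →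
    (w.getD g PySem.Dict.empty).contains a = true →
    pvReshape l (pvSetNest w g a n) = pvSetNest (pvReshape l w) g a n := by
  intro l
  induction l with
  | nil => intro w _ _ _; rfl
  | cons q l ih =>
    intro w hl hg ha
    obtain ⟨⟨g', a'⟩, m⟩ := q
    have hq : (g', a') ≠ (g, a) := hl _ (List.mem_cons_self ..)
    have hstep : pvSetNest (pvSetNest w g a n) g' a' m = pvSetNest (pvSetNest w g' a' m) g a n := by
      by_cases hgg : g' = g
      · subst hgg
        have haa : a' ≠ a := by intro h; exact hq (by rw [h])
        simp only [pvSetNest, PySem.Dict.getD_insert, PySem.Dict.insert_insert_self]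
        congr 1
        exact pv_insert_comm _ _ a' n m ha haa
      · simp only [pvSetNest, PySem.Dict.getD_insert, if_neg hgg, if_neg (Ne.symm hgg)]
        exact pv_insert_comm _ g g' _ _ hg hgg
    have h1 : pvReshape (⟨(g', a'), m⟩ :: l) (pvSetNest w g a n)
        = pvReshape l (pvSetNest (pvSetNest w g' a' m) g a n) := by
      show pvReshape l (pvSetNest (pvSetNest w g a n) g' a' m) = _
      rw [hstep]
    rw [h1, ih (pvSetNest w g' a' m) (fun p hp => hl p (List.mem_cons_of_mem _ hp))
        (by simp [pvSetNest, PySem.Dict.contains_insert, hg])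
        (by
          by_cases hgg : g' = g
          · subst hgg
            simp [pvSetNest, PySem.Dict.contains_insert, ha]
          · simpa [pvSetNest, PySem.Dict.getD_insert, Ne.symm hgg] using ha)]
    rfl



def pvInv (c : PySem.Dict (String × String) Int) : Prop :=
  ∀ g a : String,
    ((pvReshape c.items PySem.Dict.empty).getD g PySem.Dict.empty).get? a = c.get? (g, a)

theorem pv_stepA_eq (st : PySem.Dict String (PySem.Dict String Int)) (g a : String) :
    pvStepA st g a = pvSetNest st g a
      (if (st.getD g PySem.Dict.empty).contains a = true
       then (st.getD g PySem.Dict.empty).getD a 0 + 1 else 1) := by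
  by_cases hg : st.contains g = true
  · simp only [pvStepA, pvSetNest, if_pos hg]
    split_ifs <;> rfl
  · have hgf : st.contains g = false := by simpa using hg
    have hgd : st.getD g PySem.Dict.empty = PySem.Dict.empty :=
      PySem.Dict.getD_of_not_contains _ _ hgf
    simp only [pvStepA, pvSetNest, hgf, Bool.false_eq_true, if_false, hgd]
    simp [PySem.Dict.insert_insert_self]

theorem pv_get?_setNest (w : PySem.Dict String (PySem.Dict String Int)) (g a : String) (n : Int)
    (g' a' : String) :
    ((pvSetNest w g a n).getD g' PySem.Dict.empty).get? a'
      = if g' = g ∧ a' = a then some n else ((w.getD g' PySem.Dict.empty).get? a') := by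
  simp only [pvSetNest, PySem.Dict.getD_insert]
  by_cases hgg : g' = g
  · subst hgg
    simp only [true_and]
    by_cases haa : a' = a
    · simp [haa]
    · simp [haa, PySem.Dict.get?_insert]
  · simp [hgg]

theorem pv_step (c : PySem.Dict (String × String) Int) (g a : String)
    (hnd : c.keys.Nodup) (hinv : pvInv c) :
    pvReshape (pvBump c (g, a)).items PySem.Dict.empty
      = pvStepA (pvReshape c.items PySem.Dict.empty) g a := by
  set st := pvReshape c.items PySem.Dict.empty with hst
  rw [pv_stepA_eq]
  by_cases hc : c.contains (g, a) = true
  · -- (g,a) already counted: bump overwrites in place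
    obtain ⟨m, hm⟩ : ∃ m, c.get? (g, a) = some m := by
      rw [PySem.Dict.contains_eq_isSome_get?] at hc
      exact Option.isSome_iff_exists.mp hc
    have hmem : ((g, a), m) ∈ c.items := PySem.Dict.mem_items_of_get?_eq_some _ hm
    obtain ⟨l1, l2, hsplit⟩ := List.append_of_mem hmem
    have hkeys : c.keys = (l1 ++ ((g, a), m) :: l2).map Prod.fst := by
      simp only [PySem.Dict.keys, hsplit]
    have hnd' := hkeys ▸ hnd
    simp only [List.map_append, List.map_cons] at hnd'
    have h1 : ∀ p ∈ l1, p.1 ≠ (g, a) := by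
      intro p hp hpe
      exact List.disjoint_of_nodup_append hnd' (hpe ▸ List.mem_map_of_mem hp)
        (List.mem_cons_self ..)
    have h2 : ∀ p ∈ l2, p.1 ≠ (g, a) := by
      intro p hp hpe
      have hx := (List.nodup_append.mp hnd').2.1
      rw [List.nodup_cons] at hx
      exact hx.1 (hpe ▸ List.mem_map_of_mem hp)
    have hin : (st.getD g PySem.Dict.empty).get? a = some m := by rw [hinv g a, hm]
    have hcont : (st.getD g PySem.Dict.empty).contains a = true := by
      rw [PySem.Dict.contains_eq_isSome_get?, hin]; rfl
    have hgetD : (st.getD g PySem.Dict.empty).getD a 0 = m := by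
      rw [PySem.Dict.getD_eq_get?_getD, hin]; rfl
    have hcgetD : c.getD (g, a) 0 = m := by rw [PySem.Dict.getD_eq_get?_getD, hm]; rfl
    have hitems : (pvBump c (g, a)).items = l1 ++ ((g, a), c.getD (g, a) 0 + 1) :: l2 := by
      rw [pvBump, PySem.Dict.items_insert_of_contains _ _ hc, hsplit]
      simp only [List.map_append, List.map_cons,
        if_pos (by simp : ((((g, a), m) : (String × String) × Int).1 == (g, a)) = true)]
      congr 1
      · apply (List.map_congr_left _).trans (List.map_id _)
        intro p hp; simp [h1 p hp]
      · congr 1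
        apply (List.map_congr_left _).trans (List.map_id _)
        intro p hp; simp [h2 p hp]
    have hw1g : (pvSetNest (pvReshape l1 PySem.Dict.empty) g a m).contains g = true := by
      simp [pvSetNest]
    have hw1a : ((pvSetNest (pvReshape l1 PySem.Dict.empty) g a m).getD g
        PySem.Dict.empty).contains a = true := by
      simp [pvSetNest]
    have hsn : pvSetNest (pvSetNest (pvReshape l1 PySem.Dict.empty) g a m) g a
          (c.getD (g, a) 0 + 1)
        = pvSetNest (pvReshape l1 PySem.Dict.empty) g a (c.getD (g, a) 0 + 1) := by
      simp [pvSetNest, PySem.Dict.insert_insert_self]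
    calc pvReshape (pvBump c (g, a)).items PySem.Dict.empty
        = pvReshape l2 (pvSetNest (pvReshape l1 PySem.Dict.empty) g a
            (c.getD (g, a) 0 + 1)) := by
          rw [hitems]; simp [pvReshape, List.foldl_append]
      _ = pvReshape l2 (pvSetNest (pvSetNest (pvReshape l1 PySem.Dict.empty) g a m) g a
            (c.getD (g, a) 0 + 1)) := by rw [hsn]
      _ = pvSetNest (pvReshape l2 (pvSetNest (pvReshape l1 PySem.Dict.empty) g a m)) g a
            (c.getD (g, a) 0 + 1) :=
          pv_reshape_setNest_comm g a _ l2 _ h2 hw1g hw1a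
      _ = pvSetNest st g a (c.getD (g, a) 0 + 1) := by
          rw [hst, hsplit]; simp [pvReshape, List.foldl_append]
      _ = _ := by rw [if_pos hcont, hgetD, hcgetD]
  · -- fresh pair: bump appends at the end
    have hcf : c.contains (g, a) = false := by simpa using hc
    have hnone : c.get? (g, a) = none := (PySem.Dict.get?_eq_none_iff_contains _ _).mpr hcf
    have hin : (st.getD g PySem.Dict.empty).get? a = none := by rw [hinv g a, hnone]
    have hcont : (st.getD g PySem.Dict.empty).contains a = false :=
      (PySem.Dict.get?_eq_none_iff_contains _ _).mp hin
    have hitems : (pvBump c (g, a)).items = c.items ++ [((g, a), c.getD (g, a) 0 + 1)] :=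
      PySem.Dict.items_insert_of_not_contains _ _ hcf
    have hres : pvReshape (pvBump c (g, a)).items PySem.Dict.empty
        = pvSetNest st g a (c.getD (g, a) 0 + 1) := by
      rw [hitems, hst]; simp [pvReshape, List.foldl_append]
    rw [hres, PySem.Dict.getD_of_not_contains _ _ hcf, hcont]
    norm_num


theorem pv_inv_empty : pvInv PySem.Dict.empty := by
  intro g a; rfl

theorem pv_inv_bump (c : PySem.Dict (String × String) Int) (hnd : c.keys.Nodup)
    (hinv : pvInv c) (g a : String) : pvInv (pvBump c (g, a)) := by
  intro g' a'
  rw [pv_step c g a hnd hinv, pv_stepA_eq, pv_get?_setNest]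
  rw [pvBump, PySem.Dict.get?_insert]
  by_cases hpair : (g', a') = (g, a)
  · rw [Prod.mk.injEq] at hpair
    obtain ⟨hg', ha'⟩ := hpair
    subst hg'; subst ha'
    rw [if_pos ⟨rfl, rfl⟩, if_pos rfl]
    by_cases hca : c.contains (g', a') = true
    · obtain ⟨m, hm⟩ : ∃ m, c.get? (g', a') = some m := by
        rw [PySem.Dict.contains_eq_isSome_get?] at hca
        exact Option.isSome_iff_exists.mp hca
      have hin : (((pvReshape c.items PySem.Dict.empty).getD g' PySem.Dict.empty).get? a')
          = some m := by rw [hinv g' a', hm]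
      rw [if_pos (by rw [PySem.Dict.contains_eq_isSome_get?, hin]; rfl)]
      rw [PySem.Dict.getD_eq_get?_getD, hin, PySem.Dict.getD_eq_get?_getD, hm]
    · have hcf : c.contains (g', a') = false := by simpa using hca
      have hnone : c.get? (g', a') = none := (PySem.Dict.get?_eq_none_iff_contains _ _).mpr hcf
      have hin : (((pvReshape c.items PySem.Dict.empty).getD g' PySem.Dict.empty).get? a')
          = none := by rw [hinv g' a', hnone]
      rw [if_neg (by rw [PySem.Dict.contains_eq_isSome_get?, hin]; simp)]
      rw [PySem.Dict.getD_eq_get?_getD, hnone]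
      norm_num
  · rw [if_neg (fun h => hpair (by rw [h.1, h.2])), if_neg hpair]
    exact hinv g' a'

theorem pv_main (ks : List (List (String × String))) :
    ∀ c : PySem.Dict (String × String) Int, c.keys.Nodup → pvInv c →
    ks.foldl (fun st k => pvStepA st (pvKey k "gatunek") (pvKey k "autor"))
        (pvReshape c.items PySem.Dict.empty)
      = pvReshape ((ks.foldl (fun d k => pvBump d (pvKey k "gatunek", pvKey k "autor")) c).items)
          PySem.Dict.empty := by
  induction ks with
  | nil => intro c _ _; rfl
  | cons k ks ih =>
    intro c hnd hinv
    rw [List.foldl_cons, List.foldl_cons, ← pv_step c _ _ hnd hinv]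
    exact ih (pvBump c (pvKey k "gatunek", pvKey k "autor"))
      (PySem.Dict.nodup_keys_insert _ _ _ hnd)
      (pv_inv_bump c hnd hinv _ _)

-- ===== VERDICT (by name: the statement is the Claim_ definition above) =====
theorem oblicz_statystyki_spec : Claim_equal_oblicz_statystyki := by
  intro kolekcja _ _
  have h0 : (PySem.Dict.empty : PySem.Dict (String × String) Int).keys.Nodup := List.nodup_nil
  have h := pv_main kolekcja PySem.Dict.empty h0 pv_inv_empty
  exact congrArg (fun d => d.items.map (fun p => (p.1, p.2.items))) h
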